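-- pv_equiv track=rewrite | github.com/rjrealworld/WTEF-codes | latex.py | mathematical_latex
-- ===== SOURCE A (Python) =====
-- def mathematical_latex(general_latex):
--     general_latex = '+' + general_latex.strip('$').replace(' ', '') + '+'
--     reverse_term = ''
--     latex_expression = ''
--     for element in general_latex[::-1]:
--         reverse_term += element
--         if element in ['+', '-']:
--             latex_expression += reverse_term[::-1]
--             reverse_term = ''
--     return ('$' + latex_expression.strip('+')+ '$')
-- ===== SOURCE B (Python) =====
-- def mathematical_latex(general_latex):
--     s = '+' + general_latex.strip('$').replace(' ', '') + '+'
--     tokens = []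
--     cur = ''
--     for ch in s:
--         if ch in '+-':
--             tokens.append(cur)
--             cur = ch
--         else:
--             cur += ch
--     tokens.append(cur)
--     return '$' + ''.join(reversed(tokens)).strip('+') + '$'
-- ===== Notes on version B (the rewrite author's own statement) =====
-- stated objective: simpler
-- what changed: Replaces A's reverse character-scan that flushes a reversed accumulator at each sign with a forward split of the sentinel-wrapped string into an explicit list of signed tokens, which is reversed and joined at the end.
import Mathlib
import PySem

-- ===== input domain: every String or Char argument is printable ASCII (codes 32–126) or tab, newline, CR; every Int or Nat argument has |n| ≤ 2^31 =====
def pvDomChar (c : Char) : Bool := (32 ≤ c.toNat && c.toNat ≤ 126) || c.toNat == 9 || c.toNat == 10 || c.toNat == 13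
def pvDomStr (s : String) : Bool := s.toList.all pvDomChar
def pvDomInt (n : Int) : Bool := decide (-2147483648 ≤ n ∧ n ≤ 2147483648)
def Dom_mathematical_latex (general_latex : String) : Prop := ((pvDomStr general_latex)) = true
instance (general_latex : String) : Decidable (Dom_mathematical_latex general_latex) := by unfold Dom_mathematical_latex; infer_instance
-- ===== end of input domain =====

-- B replaces A's reverse character-scan-and-flush with a forward split into an explicit
-- token list (a new token at each sign) that is reversed and joined at the end (objective: simpler).

-- ===== PORT A =====
-- the for-loop over general_latex[::-1] with accumulators reverse_term / latex_expression
def mlLoopA : List Char → List Char → List Char → List Char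
  | [], _, expr => expr
  | c :: rest, rt, expr =>
    let rt' := rt ++ [c]
    if c = '+' ∨ c = '-' then mlLoopA rest [] (expr ++ rt'.reverse)
    else mlLoopA rest rt' expr

def mathematical_latex (general_latex : String) : String :=
  let s : List Char :=
    '+' :: PySem.Chars.replace (PySem.Chars.stripChars general_latex.toList ['$']) [' '] [] ++ ['+']
  -- s[::-1] is s.reverse (PySem.List.slice?_none_none_neg_one)
  let expr := mlLoopA s.reverse [] []
  String.ofList ('$' :: PySem.Chars.stripChars expr ['+'] ++ ['$'])

-- ===== PORT B =====
-- the forward loop body: state (tokens, cur); a sign closes cur and starts a new token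
def mlStepB (st : List (List Char) × List Char) (c : Char) : List (List Char) × List Char :=
  if c = '+' ∨ c = '-' then (st.1 ++ [st.2], [c]) else (st.1, st.2 ++ [c])

def mathematical_latex_alt (general_latex : String) : String :=
  let s : List Char :=
    '+' :: PySem.Chars.replace (PySem.Chars.stripChars general_latex.toList ['$']) [' '] [] ++ ['+']
  let st := s.foldl mlStepB ([], [])
  let tokens := st.1 ++ [st.2]
  -- ''.join(reversed(tokens)) = tokens.reverse.flatten
  String.ofList ('$' :: PySem.Chars.stripChars tokens.reverse.flatten ['+'] ++ ['$'])

-- ===== PRECONDITION & SPEC =====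
def Spec_mathematical_latex (general_latex : String) (out : String) : Prop := out = mathematical_latex_alt general_latex
instance (general_latex : String) (out : String) : Decidable (Spec_mathematical_latex general_latex out) := by unfold Spec_mathematical_latex; infer_instance

-- ===== CLAIM (what is proved, stated in full; the proofs are below) =====
def Claim_equal_mathematical_latex : Prop := ∀ (general_latex : String), Dom_mathematical_latex general_latex → Spec_mathematical_latex general_latex (mathematical_latex general_latex)

-- ===== LEMMAS AND PROOFS =====

-- a sign-free suffix only extends cur
theorem mlStepB_no_sign (l : List Char) (t : List (List Char)) (cur : List Char)
    (h : ∀ c ∈ l, ¬(c = '+' ∨ c = '-')) : l.foldl mlStepB (t, cur) = (t, cur ++ l) := by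
  induction l generalizing cur with
  | nil => simp
  | cons c rest ih =>
    have hc := h c (by simp)
    simp only [List.foldl_cons, mlStepB, if_neg hc]
    rw [ih (cur ++ [c]) (fun d hd => h d (List.mem_cons_of_mem _ hd))]
    simp

-- the token list never becomes empty again
theorem mlStepB_ne_nil (l : List Char) (t : List (List Char)) (cur : List Char)
    (h : t ≠ []) : (l.foldl mlStepB (t, cur)).1 ≠ [] := by
  induction l generalizing t cur with
  | nil => simpa
  | cons c rest ih =>
    simp only [List.foldl_cons, mlStepB]
    split
    · exact ih _ _ (by simp)
    · exact ih _ _ h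

-- a sign in the input makes the token list nonempty
theorem mlStepB_sign_ne_nil (l : List Char) (t : List (List Char)) (cur : List Char)
    (h : '+' ∈ l ∨ '-' ∈ l) : (l.foldl mlStepB (t, cur)).1 ≠ [] := by
  induction l generalizing t cur with
  | nil => simp at h
  | cons c rest ih =>
    by_cases hc : c = '+' ∨ c = '-'
    · simp only [List.foldl_cons, mlStepB, if_pos hc]
      exact mlStepB_ne_nil _ _ _ (by simp)
    · simp only [List.foldl_cons, mlStepB, if_neg hc]
      apply ih
      rcases h with h | h <;> rcases List.mem_cons.mp h with h' | h'
      · exact absurd (Or.inl h'.symm) hc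
      · exact Or.inl h'
      · exact absurd (Or.inr h'.symm) hc
      · exact Or.inr h'

-- the initial token list is a passive prefix of the result
theorem mlStepB_prefix (l : List Char) (t : List (List Char)) (cur : List Char) :
    l.foldl mlStepB (t, cur) = (t ++ (l.foldl mlStepB ([], cur)).1, (l.foldl mlStepB ([], cur)).2) := by
  induction l generalizing t cur with
  | nil => simp
  | cons c rest ih =>
    simp only [List.foldl_cons, mlStepB]
    by_cases hc : c = '+' ∨ c = '-'
    · rw [if_pos hc, if_pos hc]
      simp only [List.nil_append]
      rw [ih (t ++ [cur]) [c], ih [cur] [c]]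
      simp
    · rw [if_neg hc, if_neg hc]
      exact ih t (cur ++ [c])

-- A's reverse scan equals B's forward tokenization (minus the leading, never-flushed token)
theorem mlLoop_eq_tokens (cs : List Char) : ∀ (rt expr : List Char),
    mlLoopA cs.reverse rt expr =
      expr ++ (if '+' ∈ cs ∨ '-' ∈ cs then
        (((cs.foldl mlStepB ([], [])).1.drop 1 ++ [(cs.foldl mlStepB ([], [])).2 ++ rt.reverse]).reverse).flatten
      else []) := by
  induction cs using List.reverseRecOn with
  | nil => intro rt expr; simp [mlLoopA]
  | append_singleton ds c ih =>
    intro rt expr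
    rw [List.reverse_append]
    simp only [List.reverse_singleton, List.singleton_append, mlLoopA, List.foldl_append,
      List.foldl_cons, List.foldl_nil]
    by_cases hc : c = '+' ∨ c = '-'
    · rw [if_pos hc, ih]
      have hsign : ('+' ∈ ds ++ [c] ∨ '-' ∈ ds ++ [c]) := by
        rcases hc with hc | hc <;> subst hc
        · exact Or.inl (by simp)
        · exact Or.inr (by simp)
      rw [if_pos hsign]
      simp only [mlStepB, if_pos hc]
      by_cases hd : '+' ∈ ds ∨ '-' ∈ ds
      · rw [if_pos hd]
        obtain ⟨h0, t', ht⟩ : ∃ h0 t', (ds.foldl mlStepB ([], [])).1 = h0 :: t' := by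
          rcases hl : (ds.foldl mlStepB ([], [])).1 with _ | ⟨h0, t'⟩
          · exact absurd hl (mlStepB_sign_ne_nil ds _ _ hd)
          · exact ⟨h0, t', rfl⟩
        simp [ht, List.append_assoc]
      · rw [if_neg hd]
        rw [mlStepB_no_sign ds [] [] (by
          intro d hdm hsgn
          rcases hsgn with h' | h' <;> [exact hd (Or.inl (h' ▸ hdm)); exact hd (Or.inr (h' ▸ hdm))])]
        simp
    · rw [if_neg hc, ih]
      have hmem : ('+' ∈ ds ++ [c] ∨ '-' ∈ ds ++ [c]) ↔ ('+' ∈ ds ∨ '-' ∈ ds) := by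
        constructor
        · rintro (h | h) <;> rcases List.mem_append.mp h with h' | h'
          · exact Or.inl h'
          · exact absurd (Or.inl (List.mem_singleton.mp h').symm) hc
          · exact Or.inr h'
          · exact absurd (Or.inr (List.mem_singleton.mp h').symm) hc
        · rintro (h | h)
          · exact Or.inl (List.mem_append.mpr (Or.inl h))
          · exact Or.inr (List.mem_append.mpr (Or.inl h))
      simp only [mlStepB, if_neg hc]
      by_cases hd : '+' ∈ ds ∨ '-' ∈ ds
      · rw [if_pos hd, if_pos (hmem.mpr hd)]
        simp [List.append_assoc]
      · rw [if_neg hd, if_neg (fun h => hd (hmem.mp h))]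

-- ===== VERDICT (by name: the statement is the Claim_ definition above) =====
theorem mathematical_latex_spec : Claim_equal_mathematical_latex := by
  intro g _
  unfold Spec_mathematical_latex mathematical_latex mathematical_latex_alt
  set core := PySem.Chars.replace (PySem.Chars.stripChars g.toList ['$']) [' '] [] with hcore
  simp only []
  rw [mlLoop_eq_tokens]
  have hsign : '+' ∈ '+' :: core ++ ['+'] ∨ '-' ∈ '+' :: core ++ ['+'] := Or.inl (by simp)
  rw [if_pos hsign]
  have hfold : ('+' :: core ++ ['+']).foldl mlStepB ([], []) =
      ([[]] ++ ((core ++ ['+']).foldl mlStepB ([], ['+'])).1,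
       ((core ++ ['+']).foldl mlStepB ([], ['+'])).2) := by
    have : ('+' :: core ++ ['+']).foldl mlStepB ([], []) =
        (core ++ ['+']).foldl mlStepB ([[]], ['+']) := by
      simp [mlStepB]
    rw [this, mlStepB_prefix]
  rw [hfold]
  simp [List.flatten_append]
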